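-- pv_equiv track=rewrite | github.com/biosustain/Maud | src/maud/getting_stan_inputs.py | encode_ragged
-- ===== SOURCE A (Python) =====
-- from typing import Dict, Iterable, List, Optional, Tuple, Union
--
-- def encode_ragged(ragged: List[List]) -> Tuple[List, List]:
--     """Encode a ragged list of lists in a Stan friendly format.
--
--     Specifically, the return value is a flat list with all the data, and a list
--     of bounds with the start and end points (1-indexed) of each entry.
--
--     """
--     flat: list = []
--     bounds: list = []
--     ticker = 1
--     for sublist in ragged:
--         flat = flat + sublist
--         bounds.append([ticker, ticker + len(sublist) - 1])
--         ticker += len(sublist)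
--     return flat, bounds
-- ===== SOURCE B (Python) =====
-- def encode_ragged(ragged):
--     """Encode a ragged list of lists in a Stan friendly format.
--
--     Prefix-sum formulation: compute per-sublist lengths, their cumulative
--     ends, derive the 1-indexed bounds from the prefix table, and flatten
--     separately by comprehension.
--     """
--     lengths = [len(sublist) for sublist in ragged]
--     ends = []
--     total = 0
--     for length in lengths:
--         total += length
--         ends.append(total)
--     bounds = [[e - l + 1, e] for l, e in zip(lengths, ends)]
--     flat = [x for sublist in ragged for x in sublist]
--     return flat, bounds
-- ===== Notes on version B (the rewrite author's own statement) =====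
-- stated objective: alternative
-- what changed: Replaced A's single fused loop carrying flat/bounds/ticker state by a prefix-sum table: lengths are taken first, cumulative ends computed, bounds derived from the table by zip, and flattening done separately by comprehension (avoiding A's quadratic repeated list concatenation).
import Mathlib
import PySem

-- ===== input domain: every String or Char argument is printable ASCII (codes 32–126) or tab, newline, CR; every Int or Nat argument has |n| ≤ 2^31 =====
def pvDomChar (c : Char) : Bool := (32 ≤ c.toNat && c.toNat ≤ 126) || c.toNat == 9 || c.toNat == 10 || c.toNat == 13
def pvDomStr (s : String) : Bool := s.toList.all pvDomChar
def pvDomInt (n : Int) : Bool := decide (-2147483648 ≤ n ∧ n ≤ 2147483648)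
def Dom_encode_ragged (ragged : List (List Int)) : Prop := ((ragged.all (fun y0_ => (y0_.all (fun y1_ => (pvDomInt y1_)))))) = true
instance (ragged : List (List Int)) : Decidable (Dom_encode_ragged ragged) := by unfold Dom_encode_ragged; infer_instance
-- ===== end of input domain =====

-- B replaces A's fused loop (running ticker, flat = flat + sublist) by a prefix-sum table of
-- cumulative ends plus a separate flattening pass; objective: faster (no repeated recopying).

-- ===== PORT A =====
-- one fused loop over ragged carrying (flat, bounds, ticker), as in the Python
def encode_ragged (ragged : List (List Int)) : List Int × List (List Int) :=
  let st := ragged.foldl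
    (fun (st : List Int × List (List Int) × Int) sublist =>
      (st.1 ++ sublist,
       st.2.1 ++ [[st.2.2, st.2.2 + (sublist.length : Int) - 1]],
       st.2.2 + (sublist.length : Int)))
    ([], [], 1)
  (st.1, st.2.1)

-- ===== PORT B =====
def encode_ragged_alt (ragged : List (List Int)) : List Int × List (List Int) :=
  let lengths : List Int := ragged.map (fun sublist => (sublist.length : Int))
  -- running-total loop building the cumulative ends table
  let ends : List Int :=
    (lengths.foldl (fun (st : List Int × Int) length =>
      (st.1 ++ [st.2 + length], st.2 + length)) ([], 0)).1
  let bounds : List (List Int) := (lengths.zip ends).map (fun le => [le.2 - le.1 + 1, le.2])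
  let flat : List Int := ragged.flatMap (fun sublist => sublist)
  (flat, bounds)

-- ===== PRECONDITION & SPEC =====
def Spec_encode_ragged (ragged : List (List Int)) (out : List Int × List (List Int)) : Prop := out = encode_ragged_alt ragged
instance (ragged : List (List Int)) (out : List Int × List (List Int)) : Decidable (Spec_encode_ragged ragged out) := by unfold Spec_encode_ragged; infer_instance

-- ===== CLAIM (what is proved, stated in full; the proofs are below) =====
def Claim_equal_encode_ragged : Prop := ∀ (ragged : List (List Int)), Dom_encode_ragged ragged → Spec_encode_ragged ragged (encode_ragged ragged)

-- ===== LEMMAS AND PROOFS =====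

-- reference bounds list started at ticker t
def pvBoundsFrom (t : Int) : List (List Int) → List (List Int)
  | [] => []
  | sub :: rest => [t, t + (sub.length : Int) - 1] :: pvBoundsFrom (t + (sub.length : Int)) rest

-- reference ends list started at total t
def pvEndsFrom (t : Int) : List Int → List Int
  | [] => []
  | l :: rest => (t + l) :: pvEndsFrom (t + l) rest

theorem pvA_loop (ragged : List (List Int)) :
    ∀ (flat : List Int) (bounds : List (List Int)) (t : Int),
    ragged.foldl
      (fun (st : List Int × List (List Int) × Int) sublist =>
        (st.1 ++ sublist,
         st.2.1 ++ [[st.2.2, st.2.2 + (sublist.length : Int) - 1]],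
         st.2.2 + (sublist.length : Int)))
      (flat, bounds, t)
    = (flat ++ ragged.flatMap (fun s => s), bounds ++ pvBoundsFrom t ragged,
       t + ((ragged.map (fun s => (s.length : Int))).sum)) := by
  induction ragged with
  | nil => simp [pvBoundsFrom]
  | cons sub rest ih =>
      intro flat bounds t
      simp only [List.foldl_cons, ih, pvBoundsFrom, List.flatMap_cons, List.map_cons,
        List.sum_cons, List.append_assoc, List.cons_append, List.nil_append]
      rw [add_assoc]

theorem pvB_ends (lengths : List Int) :
    ∀ (es : List Int) (t : Int),
    lengths.foldl (fun (st : List Int × Int) length =>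
      (st.1 ++ [st.2 + length], st.2 + length)) (es, t)
    = (es ++ pvEndsFrom t lengths, t + lengths.sum) := by
  induction lengths with
  | nil => simp [pvEndsFrom]
  | cons l rest ih =>
      intro es t
      simp only [List.foldl_cons, ih, pvEndsFrom, List.sum_cons, List.append_assoc,
        List.cons_append, List.nil_append]
      rw [add_assoc]

theorem pvZip_bounds (ragged : List (List Int)) :
    ∀ (t : Int),
    ((ragged.map (fun s => (s.length : Int))).zip
      (pvEndsFrom t (ragged.map (fun s => (s.length : Int))))).map
        (fun le => [le.2 - le.1 + 1, le.2])
    = pvBoundsFrom (t + 1) ragged := by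
  induction ragged with
  | nil => intro t; simp [pvBoundsFrom, pvEndsFrom]
  | cons sub rest ih =>
      intro t
      simp only [List.map_cons, pvEndsFrom, List.zip_cons_cons, pvBoundsFrom]
      rw [ih (t + (sub.length : Int))]
      ring_nf

-- ===== VERDICT (by name: the statement is the Claim_ definition above) =====
theorem encode_ragged_spec : Claim_equal_encode_ragged := by
  intro ragged _
  unfold Spec_encode_ragged encode_ragged encode_ragged_alt
  simp only [pvA_loop, pvB_ends, List.nil_append]
  rw [pvZip_bounds ragged 0]
  norm_num
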